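-- pv_equiv track=rewrite | github.com/JamesM92/LXMF_Bot | src/plugins/help.py | build_category_view
-- ===== SOURCE A (Python) =====
-- def build_category_view(commands):
--
--     grouped = {}
--
--     for name, data in commands.items():
--         grouped.setdefault(data["category"], []).append(name)
--
--     output = ["📖 COMMAND CATEGORIES\n"]
--
--     for category in sorted(grouped):
--         output.append(
--             f"📦 {category} ({len(grouped[category])})"
--         )
--
--     output.append("\nUse: help <category>")
--     return "\n".join(output)
-- ===== SOURCE B (Python) =====
-- def build_category_view(commands):
--     # sort the category of every command once, then count contiguous runs;
--     # no dict-of-lists is ever built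
--     cats = sorted(data["category"] for data in commands.values())
--     runs = []
--     i, n = 0, len(cats)
--     while i < n:
--         j = i
--         while j < n and cats[j] == cats[i]:
--             j += 1
--         runs.append((cats[i], j - i))
--         i = j
--     lines = ["📖 COMMAND CATEGORIES\n"]
--     for category, count in runs:
--         lines.append(f"📦 {category} ({count})")
--     lines.append("\nUse: help <category>")
--     return "\n".join(lines)
-- ===== Notes on version B (the rewrite author's own statement) =====
-- stated objective: alternative
-- what changed: B never builds A's dict-of-lists: it sorts the multiset of category names once and run-length-scans the sorted list with two indices, emitting one line per contiguous run, so no grouping structure and no separate sort-of-keys step exist.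
import Mathlib
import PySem

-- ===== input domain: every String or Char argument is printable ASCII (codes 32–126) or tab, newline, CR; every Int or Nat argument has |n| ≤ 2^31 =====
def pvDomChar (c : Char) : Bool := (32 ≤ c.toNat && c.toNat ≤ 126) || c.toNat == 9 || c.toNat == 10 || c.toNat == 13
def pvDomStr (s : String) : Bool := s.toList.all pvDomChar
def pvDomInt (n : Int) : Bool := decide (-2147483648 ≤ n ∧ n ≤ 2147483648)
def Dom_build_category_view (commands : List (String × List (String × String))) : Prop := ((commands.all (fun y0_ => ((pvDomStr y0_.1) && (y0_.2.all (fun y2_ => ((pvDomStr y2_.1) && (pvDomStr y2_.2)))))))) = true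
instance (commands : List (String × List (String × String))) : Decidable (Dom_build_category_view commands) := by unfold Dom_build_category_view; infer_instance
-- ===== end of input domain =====

-- B replaces A's dict-of-lists grouping by a single sort of the category multiset followed by a run-length scan (alternative decomposition, same results).


-- ===== PORT A =====
-- data["category"]; the default "" is never used inside Pre_ (which requires the key)
def pvCat (data : List (String × String)) : String :=
  (PySem.Dict.ofList data).getD "category" ""

def build_category_view (commands : List (String × List (String × String))) : String :=
  let items := (PySem.Dict.ofList commands).items
  let grouped := items.foldl
    (fun d p => d.modify (pvCat p.2) [] (fun v => v ++ [p.1])) PySem.Dict.empty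
  let output : List String := ["📖 COMMAND CATEGORIES\n"]
  let output := (PySem.List.sorted grouped.keys (fun x => x)).foldl
    (fun out c => out ++ ["📦 " ++ c ++ " (" ++ PySem.Int.toStr ((grouped.getD c []).length : Int) ++ ")"]) output
  let output := output ++ ["\nUse: help <category>"]
  PySem.Str.join "\n" output

-- ===== PORT B =====
-- the two-index while loop of Source B: one (category, run length) pair per contiguous run
def bcvRuns : List String → List (String × Int)
  | [] => []
  | c :: rest =>
      (c, ((rest.takeWhile (fun x => x == c)).length : Int) + 1)
        :: bcvRuns (rest.dropWhile (fun x => x == c))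
termination_by m => m.length
decreasing_by
  simp only [List.length_cons]
  exact Nat.lt_succ_of_le (List.length_dropWhile_le _ _)

def build_category_view_alt (commands : List (String × List (String × String))) : String :=
  let cats := PySem.List.sorted (((PySem.Dict.ofList commands).values).map pvCat) (fun x => x)
  let runs := bcvRuns cats
  let lines := "📖 COMMAND CATEGORIES\n"
    :: runs.map (fun p => "📦 " ++ p.1 ++ " (" ++ PySem.Int.toStr p.2 ++ ")")
    ++ ["\nUse: help <category>"]
  PySem.Str.join "\n" lines

-- ===== PRECONDITION & SPEC =====
-- Pre_ excludes exactly the inputs where some command's data lacks the key "category": A raises KeyError there.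
def Pre_build_category_view (commands : List (String × List (String × String))) : Prop :=
  ∀ data ∈ (PySem.Dict.ofList commands).values, "category" ∈ data.map Prod.fst
instance (commands : List (String × List (String × String))) : Decidable (Pre_build_category_view commands) := by unfold Pre_build_category_view; infer_instance

def pvWitness_build_category_view : (List (String × List (String × String))) :=
  [("ping", [("category", "net")]), ("sum", [("category", "math"), ("hidden", "no")])]

def Spec_build_category_view (commands : List (String × List (String × String))) (out : String) : Prop := out = build_category_view_alt commands
instance (commands : List (String × List (String × String))) (out : String) : Decidable (Spec_build_category_view commands out) := by unfold Spec_build_category_view; infer_instance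

-- ===== CLAIM (what is proved, stated in full; the proofs are below) =====
def Claim_equal_build_category_view : Prop := ∀ (commands : List (String × List (String × String))), Dom_build_category_view commands → Pre_build_category_view commands → Spec_build_category_view commands (build_category_view commands)

-- ===== LEMMAS AND PROOFS =====

-- length of each group A accumulates = how often the category occurs
lemma grouped_getD_length (cs : List (String × List (String × String)))
    (d : PySem.Dict String (List String)) (c : String) :
    ((cs.foldl (fun d p => d.modify (pvCat p.2) [] (fun v => v ++ [p.1])) d).getD c []).length
      = (d.getD c []).length + (cs.map (fun p => pvCat p.2)).count c := by
  induction cs generalizing d with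
  | nil => simp
  | cons p cs ih =>
      simp only [List.foldl_cons, List.map_cons, ih]
      by_cases h : c = pvCat p.2
      · subst h
        rw [PySem.Dict.getD_modify_self]
        simp only [List.length_append, List.length_cons, List.length_nil, List.count_cons_self]
        omega
      · rw [PySem.Dict.getD_modify_of_ne _ _ _ h]
        simp [Ne.symm h]

-- the structure of one sorted run
lemma run_split (c : String) (rest : List String)
    (h : (c :: rest).Pairwise (· ≤ ·)) :
    (∀ x ∈ rest.takeWhile (fun x => x == c), x = c) ∧
    (∀ x ∈ rest.dropWhile (fun x => x == c), c < x) ∧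
    (rest.dropWhile (fun x => x == c)).Pairwise (· ≤ ·) := by
  rw [List.pairwise_cons] at h
  obtain ⟨hc, hr⟩ := h
  refine ⟨fun x hx => ?_, ?_, List.Pairwise.sublist (List.dropWhile_sublist _) hr⟩
  · have hb := List.mem_takeWhile_imp hx
    exact eq_of_beq hb
  intro x hx
  have hsub := List.dropWhile_sublist (l := rest) (fun x => x == c)
  have hle : c ≤ x := hc x (hsub.subset hx)
  refine lt_of_le_of_ne hle ?_
  intro hxc
  rw [← hxc] at hx
  have hne : rest.dropWhile (fun x => x == c) ≠ [] := by
    intro hnil; rw [hnil] at hx; exact absurd hx (List.not_mem_nil)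
  have hd0 : ((rest.dropWhile (fun x => x == c)).head hne == c) = false :=
    List.head_dropWhile_not (fun x => x == c) hne
  have hd0' : (rest.dropWhile (fun x => x == c)).head hne ≠ c := by simpa using hd0
  have hdp : (rest.dropWhile (fun x => x == c)).Pairwise (· ≤ ·) :=
    List.Pairwise.sublist (List.dropWhile_sublist _) hr
  have hcd : c ≤ (rest.dropWhile (fun x => x == c)).head hne :=
    hc _ (hsub.subset (List.head_mem hne))
  have hcons := List.cons_head_tail hne
  rw [← hcons] at hx hdp
  rw [List.pairwise_cons] at hdp
  rcases List.mem_cons.mp hx with hxd | hxtl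
  · exact hd0' hxd.symm
  · exact hd0' (le_antisymm (hdp.1 c hxtl) hcd)

-- bcvRuns of a sorted list: distinct categories in strictly increasing order, with their counts
lemma bcvRuns_spec (m : List String) (h : m.Pairwise (· ≤ ·)) :
    (∀ x, x ∈ (bcvRuns m).map Prod.fst ↔ x ∈ m) ∧
    ((bcvRuns m).map Prod.fst).Pairwise (· < ·) ∧
    (∀ p ∈ bcvRuns m, p.2 = (m.count p.1 : Int)) := by
  induction m using bcvRuns.induct with
  | case1 => simp [bcvRuns]
  | case2 c rest ih =>
      obtain ⟨ht, hdlt, hdp⟩ := run_split c rest h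
      obtain ⟨ihmem, ihpw, ihcount⟩ := ih hdp
      have hsplit : rest.takeWhile (fun x => x == c) ++ rest.dropWhile (fun x => x == c) = rest :=
        List.takeWhile_append_dropWhile
      have hcd : c ∉ rest.dropWhile (fun x => x == c) := fun hmem => absurd (hdlt c hmem) (lt_irrefl c)
      rw [bcvRuns]
      refine ⟨?_, ?_, ?_⟩
      · intro x
        rw [List.map_cons, List.mem_cons, List.mem_cons, ihmem]
        constructor
        · rintro (rfl | hx)
          · exact Or.inl rfl
          · exact Or.inr ((List.dropWhile_sublist _).subset hx)
        · rintro (rfl | hx)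
          · exact Or.inl rfl
          · rw [← hsplit] at hx
            rcases List.mem_append.mp hx with hx | hx
            · exact Or.inl (ht x hx)
            · exact Or.inr hx
      · rw [List.map_cons, List.pairwise_cons]
        exact ⟨fun y hy => hdlt y ((ihmem y).mp hy), ihpw⟩
      · intro p hp
        rcases List.mem_cons.mp hp with rfl | hp
        · simp only []
          have h1 : (rest.takeWhile (fun x => x == c)).count c
              = (rest.takeWhile (fun x => x == c)).length :=
            List.count_eq_length.mpr (fun b hb => (ht b hb).symm)
          have h2 : (rest.dropWhile (fun x => x == c)).count c = 0 :=
            List.count_eq_zero.mpr hcd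
          have hr : rest.count c = (rest.takeWhile (fun x => x == c)).length := by
            conv_lhs => rw [← hsplit]
            rw [List.count_append, h1, h2, Nat.add_zero]
          rw [List.count_cons_self, hr]
          push_cast
          ring
        · have hmem : p.1 ∈ rest.dropWhile (fun x => x == c) :=
            (ihmem p.1).mp (List.mem_map_of_mem hp)
          have hne : p.1 ≠ c := fun hh => absurd (hdlt p.1 hmem) (by rw [hh]; exact lt_irrefl c)
          have h1 : (rest.takeWhile (fun x => x == c)).count p.1 = 0 :=
            List.count_eq_zero.mpr (fun hmm => hne (ht _ hmm))
          have hr : rest.count p.1 = (rest.dropWhile (fun x => x == c)).count p.1 := by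
            conv_lhs => rw [← hsplit]
            rw [List.count_append, h1, Nat.zero_add]
          rw [ihcount p hp, List.count_cons_of_ne (Ne.symm hne), hr]

-- ===== VERDICT (by name: the statement is the Claim_ definition above) =====
theorem build_category_view_spec : Claim_equal_build_category_view := by
  intro commands _ _
  unfold Spec_build_category_view build_category_view build_category_view_alt
  simp only []
  set items := (PySem.Dict.ofList commands).items with hitems
  set catsI : List String := items.map (fun p => pvCat p.2) with hcatsI
  have hvals : ((PySem.Dict.ofList commands).values).map pvCat = catsI := by
    simp only [PySem.Dict.values, List.map_map, Function.comp_def]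
    rfl
  set m : List String := PySem.List.sorted catsI (fun x => x) with hm
  have hpw : m.Pairwise (· ≤ ·) := PySem.List.sorted_pairwise catsI (fun x => x)
  obtain ⟨hmem, hlt, hcnt⟩ := bcvRuns_spec m hpw
  set grouped := items.foldl
    (fun d p => d.modify (pvCat p.2) [] (fun v => v ++ [p.1])) PySem.Dict.empty with hg
  have hkeys : grouped.keys = PySem.Set.ofList catsI := by
    rw [hg, PySem.Dict.keys_foldl_modify_key items (fun p => pvCat p.2) []
      (fun d p v => v ++ [p.1]), PySem.Dict.keys_empty, PySem.Set.update_nil_left]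
  have hglen : ∀ c, (grouped.getD c []).length = catsI.count c := by
    intro c
    rw [hg, grouped_getD_length]
    simp [PySem.Dict.getD, PySem.Dict.get?, PySem.Dict.empty, hcatsI]
  have hsorted : PySem.List.sorted grouped.keys (fun x => x) = (bcvRuns m).map Prod.fst := by
    apply PySem.List.sorted_eq_of_perm_of_pairwise_lt
    · rw [hkeys]
      refine (List.perm_ext_iff_of_nodup ?_ (PySem.Set.nodup_ofList _)).mpr ?_
      · exact hlt.imp ne_of_lt
      · intro x
        rw [hmem x, PySem.Set.mem_ofList, hm, PySem.List.mem_sorted]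
    · exact hlt
  rw [PySem.List.foldl_append_singleton_eq_map, hsorted, hvals, ← hm, List.map_map]
  have hbody : ((bcvRuns m).map
        ((fun c => "📦 " ++ c ++ " (" ++ PySem.Int.toStr ((grouped.getD c []).length : Int) ++ ")") ∘ Prod.fst))
      = (bcvRuns m).map (fun p => "📦 " ++ p.1 ++ " (" ++ PySem.Int.toStr p.2 ++ ")") := by
    apply List.map_congr_left
    intro p hp
    have : ((grouped.getD p.1 []).length : Int) = p.2 := by
      rw [hglen, hcnt p hp, hm]
      have hpc := (PySem.List.sorted_perm catsI (fun x => x) false).count_eq p.1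
      exact_mod_cast hpc.symm
    simp [Function.comp, this]
  rw [hbody]
  simp
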